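-- pv_equiv track=rewrite | github.com/HRBialik18/Gambit2.0 | ImageProcessing.py | FENupdate
-- ===== SOURCE A (Python) =====
-- def FENupdate (newMOF): #Given Mock Fen gives peice information in FEN notatoin
--     # Initialize an empty 2D array to store the characters
--     characters = []
--
--     # Initialize a temporary row to store the characters in each row
--     temp_row = []
--
--     # Loop through each character in the string and add it to the 2D array (ignoring spaces and newlines)
--     for i, char in enumerate(newMOF):
--         if char != ' ' and char != '\n':
--             temp_row.append(char)
--
--             # If the temporary row contains 8 characters, add it to the 2D array and start a new row
--             if len(temp_row) == 8:
--                 characters.append(temp_row)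
--                 temp_row = []
--
--     # If there are any remaining characters in the temporary row, add it to the 2D array as a partial row
--     if len(temp_row) > 0:
--         characters.append(temp_row)
--
--     output_str = ""
--
--     # Loop through each row in the 2D array
--     for row in characters:
--         # Initialize a counter for consecutive zeros
--         zero_count = 0
--
--         # Loop through each character in the row
--         for char in row:
--             # If the character is nonzero, add it to the output string and reset the zero count
--             if char != '0':
--                 if zero_count > 0:
--                     output_str += str(zero_count)
--                     zero_count = 0
--                 output_str += char
--             # If the character is zero, increment the zero count
--             else:
--                 zero_count += 1
--
--         # If there are any remaining consecutive zeros at the end of the row, add them to the output string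
--         if zero_count > 0:
--             output_str += str(zero_count)
--
--         # Add a forward slash between each row
--         output_str += "/"
--
--     # Remove the last forward slash from the output string
--     output_str = output_str[:-1]
--
--     if (newMOF != "no differences detected"):
--         return output_str
--     else:
--         return 'no changes made to FEN'
-- ===== SOURCE B (Python) =====
-- def FENupdate(newMOF):
--     if newMOF == "no differences detected":
--         return 'no changes made to FEN'
--     cleaned = [c for c in newMOF if c != ' ' and c != '\n']
--     rows = [cleaned[i:i + 8] for i in range(0, len(cleaned), 8)]
--
--     def encode(row):
--         parts = []
--         i = 0
--         while i < len(row):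
--             j = i
--             while j < len(row) and row[j] == row[i]:
--                 j += 1
--             run = j - i
--             parts.append(str(run) if row[i] == '0' else row[i] * run)
--             i = j
--         return ''.join(parts)
--
--     return '/'.join(encode(r) for r in rows)
-- ===== Notes on version B (the rewrite author's own statement) =====
-- stated objective: alternative
-- what changed: Replaces A's character-by-character state machine (manual 8-cell row accumulator plus a zero-counter with flush logic and a trailing-separator strip) by filter-then-chunk slicing and per-row run-length grouping joined between rows.
import Mathlib
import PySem

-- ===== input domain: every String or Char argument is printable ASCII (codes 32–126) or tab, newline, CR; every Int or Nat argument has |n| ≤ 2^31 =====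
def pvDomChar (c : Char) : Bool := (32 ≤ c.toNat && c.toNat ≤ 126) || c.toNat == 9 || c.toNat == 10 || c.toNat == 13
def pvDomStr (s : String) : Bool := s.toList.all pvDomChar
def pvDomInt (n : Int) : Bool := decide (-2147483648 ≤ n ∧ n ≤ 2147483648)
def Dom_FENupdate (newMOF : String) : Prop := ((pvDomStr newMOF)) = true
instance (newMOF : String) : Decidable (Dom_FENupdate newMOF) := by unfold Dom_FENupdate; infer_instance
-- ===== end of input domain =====

-- B replaces A's character-by-character state machine by filter/chunk slicing plus run-length grouping joined with '/'; same cost, plainer structure.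

-- ===== PORT A =====
-- the 'for i, char in enumerate(newMOF)' loop: state = (characters, temp_row)
def FENstepA (st : List (List Char) × List Char) (c : Char) : List (List Char) × List Char :=
  if c ≠ ' ' ∧ c ≠ '\n' then
    let temp := st.2 ++ [c]
    if temp.length = 8 then (st.1 ++ [temp], []) else (st.1, temp)
  else st

-- the inner 'for char in row' loop: state = (output_str, zero_count)
def FENrowA (p : List Char × Int) (c : Char) : List Char × Int :=
  if c ≠ '0' then
    ((if p.2 > 0 then p.1 ++ PySem.Int.toChars p.2 else p.1) ++ [c], 0)
  else (p.1, p.2 + 1)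

def FENupdate (newMOF : String) : String :=
  let st := newMOF.toList.foldl FENstepA ([], [])
  let characters := if st.2.length > 0 then st.1 ++ [st.2] else st.1
  let out := characters.foldl (fun out row =>
      let p := row.foldl FENrowA (out, 0)
      (if p.2 > 0 then p.1 ++ PySem.Int.toChars p.2 else p.1) ++ ['/']) []
  let out := PySem.List.slice out none (some (-1))   -- output_str[:-1]
  if newMOF ≠ "no differences detected" then String.ofList out
  else "no changes made to FEN"

-- ===== PORT B =====
-- rows = [cleaned[i:i+8] for i in range(0, len(cleaned), 8)]
def FENchunk8 : List Char → List (List Char)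
  | [] => []
  | c :: rest => ((c :: rest).take 8) :: FENchunk8 ((c :: rest).drop 8)
  termination_by l => l.length
  decreasing_by simp [List.length_drop]

-- encode(row): scan the run starting at the head, emit it, recurse on the remainder
def FENencode : List Char → List Char
  | [] => []
  | c :: rest =>
    let run := 1 + (rest.takeWhile (· == c)).length
    (if c = '0' then PySem.Int.toChars (run : Int) else List.replicate run c)
      ++ FENencode (rest.dropWhile (· == c))
  termination_by l => l.length
  decreasing_by
    simp only [List.length_cons]
    exact Nat.lt_succ_of_le (List.length_dropWhile_le _ _)

def FENupdate_alt (newMOF : String) : String :=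
  if newMOF = "no differences detected" then "no changes made to FEN"
  else
    let cleaned := newMOF.toList.filter (fun c => decide (c ≠ ' ' ∧ c ≠ '\n'))
    String.ofList (PySem.Chars.join ['/'] ((FENchunk8 cleaned).map FENencode))

-- ===== PRECONDITION & SPEC =====
def Spec_FENupdate (newMOF : String) (out : String) : Prop := out = FENupdate_alt newMOF
instance (newMOF : String) (out : String) : Decidable (Spec_FENupdate newMOF out) := by unfold Spec_FENupdate; infer_instance

-- ===== CLAIM (what is proved, stated in full; the proofs are below) =====
def Claim_equal_FENupdate : Prop := ∀ (newMOF : String), Dom_FENupdate newMOF → Spec_FENupdate newMOF (FENupdate newMOF)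

-- ===== LEMMAS AND PROOFS =====

-- A's first loop, finalized with the partial-row push, builds B's 8-chunks of the filtered chars
theorem FENchunk8_full (t fl : List Char) (h : t.length = 8) :
    FENchunk8 (t ++ fl) = t :: FENchunk8 fl := by
  match t with
  | [] => simp at h
  | c :: rest =>
    rw [show ((c :: rest) ++ fl) = c :: (rest ++ fl) from rfl, FENchunk8,
        show (c :: (rest ++ fl)) = (c :: rest) ++ fl from rfl,
        List.take_left' h, List.drop_left' h]

theorem FENchunk8_small (t : List Char) (h : t.length < 8) :
    FENchunk8 t = if t.length > 0 then [t] else [] := by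
  match t with
  | [] => simp [FENchunk8]
  | c :: rest =>
    rw [FENchunk8]
    have h1 : (c :: rest).take 8 = c :: rest := List.take_of_length_le (by omega)
    have h2 : (c :: rest).drop 8 = [] := List.drop_of_length_le (by omega)
    simp [h1, h2, FENchunk8]

theorem FENchunk_inv (l : List Char) (chars : List (List Char)) (temp : List Char)
    (h : temp.length < 8) :
    (let st := l.foldl FENstepA (chars, temp)
     if st.2.length > 0 then st.1 ++ [st.2] else st.1)
    = chars ++ FENchunk8 (temp ++ l.filter (fun c => decide (c ≠ ' ' ∧ c ≠ '\n'))) := by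
  induction l generalizing chars temp with
  | nil =>
    simp only [List.foldl_nil, List.filter_nil, List.append_nil]
    rw [FENchunk8_small temp h]
    split <;> simp
  | cons c l ih =>
    simp only [List.foldl_cons]
    by_cases hp : c ≠ ' ' ∧ c ≠ '\n'
    · rw [show FENstepA (chars, temp) c = (if (temp ++ [c]).length = 8
            then (chars ++ [temp ++ [c]], ([] : List Char)) else (chars, temp ++ [c]))
          from by simp [FENstepA, hp]]
      by_cases h8 : (temp ++ [c]).length = 8
      · rw [if_pos h8, ih _ _ (by simp)]
        rw [List.filter_cons_of_pos (by simpa using hp), List.nil_append,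
            show temp ++ c :: List.filter (fun c => decide (c ≠ ' ' ∧ c ≠ '\n')) l
              = (temp ++ [c]) ++ List.filter (fun c => decide (c ≠ ' ' ∧ c ≠ '\n')) l
              from by simp,
            FENchunk8_full _ _ h8, List.append_assoc]
        rfl
      · rw [if_neg h8, ih _ _ (by simp at h8 ⊢; omega)]
        rw [List.filter_cons_of_pos (by simpa using hp)]
        simp
    · rw [show FENstepA (chars, temp) c = (chars, temp) from by simp [FENstepA, hp]]
      rw [ih _ _ h, List.filter_cons_of_neg (by simpa using hp)]

-- str(zc) flush
def FENflush (p : List Char × Int) : List Char :=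
  if p.2 > 0 then p.1 ++ PySem.Int.toChars p.2 else p.1

theorem FENencode_zeros (zc : Nat) :
    FENencode (List.replicate zc '0') = if zc = 0 then [] else PySem.Int.toChars (zc : Int) := by
  cases zc with
  | zero => simp [FENencode]
  | succ n =>
    rw [List.replicate_succ, FENencode]
    simp [FENencode, Nat.add_comm 1 n]

theorem FENencode_nonzero (c : Char) (rest : List Char) (hc : c ≠ '0') :
    FENencode (c :: rest) = c :: FENencode rest := by
  match rest with
  | [] => simp [FENencode, hc]
  | d :: r =>
    by_cases hdc : d = c
    · subst hdc
      simp only [FENencode, hc, if_false, List.takeWhile_cons, List.dropWhile_cons,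
        beq_self_eq_true, if_true, List.length_cons]
      have h1 : 1 + ((List.takeWhile (fun x => x == d) r).length + 1)
          = (1 + (List.takeWhile (fun x => x == d) r).length) + 1 := by omega
      rw [h1, List.replicate_succ]
      simp
    · have hb : (d == c) = false := by simp [hdc]
      conv_lhs => rw [FENencode]
      simp only [List.takeWhile_cons, List.dropWhile_cons, hb, if_false, hc]
      simp [List.replicate_succ]

theorem FENtw (zc : Nat) (c : Char) (row : List Char) (hc : c ≠ '0') :
    (List.replicate zc '0' ++ c :: row).takeWhile (· == '0') = List.replicate zc '0' ∧
    (List.replicate zc '0' ++ c :: row).dropWhile (· == '0') = c :: row := by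
  induction zc with
  | zero => simp [List.takeWhile_cons_of_neg, List.dropWhile_cons_of_neg, hc]
  | succ n ih =>
    rw [List.replicate_succ, List.cons_append]
    simp only [List.takeWhile_cons, List.dropWhile_cons, beq_self_eq_true, if_true]
    exact ⟨by rw [ih.1, ← List.replicate_succ], ih.2⟩

theorem FENencode_flushzeros (zc : Nat) (c : Char) (row : List Char) (hc : c ≠ '0') :
    FENencode (List.replicate zc '0' ++ c :: row)
    = (if zc = 0 then [] else PySem.Int.toChars (zc : Int)) ++ FENencode (c :: row) := by
  cases zc with
  | zero => simp
  | succ n =>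
    rw [List.replicate_succ, List.cons_append, FENencode]
    simp only [(FENtw n c row hc).1, (FENtw n c row hc).2, List.length_replicate]
    simp [Nat.add_comm 1 n]

-- A's inner row loop with a pending zero count equals B's run-grouping encoder
theorem FENrow_inv (row : List Char) (out : List Char) (zc : Nat) :
    FENflush (row.foldl FENrowA (out, (zc : Int)))
    = out ++ FENencode (List.replicate zc '0' ++ row) := by
  induction row generalizing out zc with
  | nil =>
    simp only [List.foldl_nil, List.append_nil, FENflush, FENencode_zeros]
    by_cases h0 : zc = 0
    · simp [h0]
    · rw [if_pos (by exact_mod_cast Nat.pos_of_ne_zero h0), if_neg h0]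
  | cons c row ih =>
    simp only [List.foldl_cons]
    by_cases hc : c = '0'
    · subst hc
      rw [show FENrowA (out, (zc : Int)) '0' = (out, ((zc : Int) + 1)) from by
            simp [FENrowA]]
      rw [show ((zc : Int) + 1) = ((zc + 1 : Nat) : Int) from by push_cast; ring]
      rw [ih out (zc + 1), List.replicate_succ']
      simp
    · rw [show FENrowA (out, (zc : Int)) c
            = (FENflush (out, (zc : Int)) ++ [c], ((0 : Nat) : Int)) from by
            simp [FENrowA, FENflush, hc]]
      rw [ih _ 0, FENencode_flushzeros zc c row hc, FENencode_nonzero c row hc]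
      simp only [List.replicate_zero, List.nil_append, FENflush]
      by_cases h0 : zc = 0
      · simp [h0]
      · rw [if_pos (by exact_mod_cast Nat.pos_of_ne_zero h0), if_neg h0]
        simp

-- stripping the trailing slash of the concatenation is the '/'-join
theorem FENjoin_eq (ls : List (List Char)) :
    (ls.flatMap (· ++ ['/'])).dropLast = PySem.Chars.join ['/'] ls := by
  induction ls with
  | nil => simp [PySem.Chars.join_nil]
  | cons x xs ih =>
    cases xs with
    | nil => simp [PySem.Chars.join_singleton]
    | cons y r =>
      rw [List.flatMap_cons,
          List.dropLast_append_of_ne_nil (by simp [List.flatMap_cons]),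
          ih, PySem.Chars.join_cons_cons]

-- ===== VERDICT (by name: the statement is the Claim_ definition above) =====
theorem FENupdate_spec : Claim_equal_FENupdate := by
  unfold Claim_equal_FENupdate Spec_FENupdate
  intro newMOF _
  by_cases h : newMOF = "no differences detected"
  · simp [FENupdate, FENupdate_alt, h]
  · rw [FENupdate, FENupdate_alt, if_pos h, if_neg h]
    simp only [PySem.List.slice_to_neg_one]
    congr 1
    have hfold : ∀ (chars : List (List Char)) (acc : List Char),
        chars.foldl (fun out row =>
          let p := row.foldl FENrowA (out, 0)
          (if p.2 > 0 then p.1 ++ PySem.Int.toChars p.2 else p.1) ++ ['/']) acc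
        = acc ++ chars.flatMap (fun row => FENencode row ++ ['/']) := by
      intro chars
      induction chars with
      | nil => intro acc; simp
      | cons row rest ih =>
        intro acc
        rw [List.foldl_cons, ih, List.flatMap_cons]
        have h2 := FENrow_inv row acc 0
        simp only [List.replicate_zero, List.nil_append, FENflush, Nat.cast_zero] at h2
        dsimp only
        rw [h2]
        simp [List.append_assoc]
    rw [hfold _ []]
    simp only [List.nil_append]
    rw [FENchunk_inv newMOF.toList [] [] (by simp)]
    simp only [List.nil_append]
    rw [← FENjoin_eq, List.flatMap_map]
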